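-- pv_equiv track=rewrite | github.com/AbinZorto/eeg-mlflow | scripts/plot_sweep_roc_auc.py | infer_metric_label
-- ===== SOURCE A (Python) =====
-- from typing import Any, Dict, Iterable, List, Optional, Sequence, Tuple
--
-- KNOWN_METRIC_LABELS = {
--     "patient_roc_auc": "Patient ROC-AUC",
--     "patient_pr_auc": "Patient PR-AUC",
--     "patient_balanced_accuracy": "Patient Balanced Accuracy",
--     "patient_accuracy": "Patient Accuracy",
--     "patient_f1": "Patient F1",
--     "patient_mcc": "Patient MCC",
--     "feature_selection_mean_pairwise_jaccard": "Mean Pairwise Jaccard",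
--     "feature_selection_median_pairwise_jaccard": "Median Pairwise Jaccard",
--     "feature_selection_kuncheva_index_mean": "Mean Kuncheva Index",
--     "feature_selection_kuncheva_index_median": "Median Kuncheva Index",
--     "feature_selection_mean_top_k_overlap": "Mean Top-k Overlap",
--     "feature_selection_median_top_k_overlap": "Median Top-k Overlap",
--     "feature_selection_effect_mean_sign_consistency": "Mean Effect Sign Consistency",
--     "feature_selection_importance_mean_variance": "Mean Importance Variance",
--     "feature_selection_class_conditional_selection_available": "Class-Conditional Selection Available",
--     "feature_selection_ranking_available": "Ranking Stability Available",
--     "feature_selection_importance_available": "Importance Stability Available",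
--     "feature_selection_resampling_enabled": "Resampling Stability Enabled",
-- }
--
-- def infer_metric_label(metric_key: str) -> str:
--     if metric_key in KNOWN_METRIC_LABELS:
--         return KNOWN_METRIC_LABELS[metric_key]
--
--     prefix = ""
--     remainder = metric_key
--     if metric_key.startswith("patient_"):
--         prefix = "Patient "
--         remainder = metric_key[len("patient_") :]
--     elif metric_key.startswith("window_"):
--         prefix = "Window "
--         remainder = metric_key[len("window_") :]
--     elif metric_key.startswith("feature_selection_"):
--         remainder = metric_key[len("feature_selection_") :]
--
--     tokens = remainder.split("_")
--     words: List[str] = []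
--     i = 0
--     while i < len(tokens):
--         token = tokens[i]
--         next_token = tokens[i + 1] if i + 1 < len(tokens) else None
--         if token == "roc" and next_token == "auc":
--             words.append("ROC-AUC")
--             i += 2
--             continue
--         if token == "pr" and next_token == "auc":
--             words.append("PR-AUC")
--             i += 2
--             continue
--         if token == "top" and next_token == "k":
--             words.append("Top-k")
--             i += 2
--             continue
--         if token == "mcc":
--             words.append("MCC")
--         elif token == "npv":
--             words.append("NPV")
--         elif token == "f1":
--             words.append("F1")
--         elif token == "k":
--             words.append("k")
--         else:
--             words.append(token.capitalize())
--         i += 1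
--     label = " ".join(words)
--     return f"{prefix}{label}".strip()
-- ===== SOURCE B (Python) =====
-- # Alternative: single right-to-left pass over the tokens consuming bigrams from the
-- # end (provably equivalent since no token is both a bigram start and a bigram end),
-- # with table-driven token display instead of the if/elif chain.
--
-- KNOWN_METRIC_LABELS = {
--     "patient_roc_auc": "Patient ROC-AUC",
--     "patient_pr_auc": "Patient PR-AUC",
--     "patient_balanced_accuracy": "Patient Balanced Accuracy",
--     "patient_accuracy": "Patient Accuracy",
--     "patient_f1": "Patient F1",
--     "patient_mcc": "Patient MCC",
--     "feature_selection_mean_pairwise_jaccard": "Mean Pairwise Jaccard",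
--     "feature_selection_median_pairwise_jaccard": "Median Pairwise Jaccard",
--     "feature_selection_kuncheva_index_mean": "Mean Kuncheva Index",
--     "feature_selection_kuncheva_index_median": "Median Kuncheva Index",
--     "feature_selection_mean_top_k_overlap": "Mean Top-k Overlap",
--     "feature_selection_median_top_k_overlap": "Median Top-k Overlap",
--     "feature_selection_effect_mean_sign_consistency": "Mean Effect Sign Consistency",
--     "feature_selection_importance_mean_variance": "Mean Importance Variance",
--     "feature_selection_class_conditional_selection_available": "Class-Conditional Selection Available",
--     "feature_selection_ranking_available": "Ranking Stability Available",
--     "feature_selection_importance_available": "Importance Stability Available",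
--     "feature_selection_resampling_enabled": "Resampling Stability Enabled",
-- }
--
-- _BIGRAMS = {("roc", "auc"): "ROC-AUC", ("pr", "auc"): "PR-AUC", ("top", "k"): "Top-k"}
-- _SPECIAL = {"mcc": "MCC", "npv": "NPV", "f1": "F1", "k": "k"}
--
--
-- def infer_metric_label(metric_key: str) -> str:
--     if metric_key in KNOWN_METRIC_LABELS:
--         return KNOWN_METRIC_LABELS[metric_key]
--
--     prefix = ""
--     remainder = metric_key
--     if metric_key.startswith("patient_"):
--         prefix = "Patient "
--         remainder = metric_key[len("patient_"):]
--     elif metric_key.startswith("window_"):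
--         prefix = "Window "
--         remainder = metric_key[len("window_"):]
--     elif metric_key.startswith("feature_selection_"):
--         remainder = metric_key[len("feature_selection_"):]
--
--     tokens = remainder.split("_")
--     words = []
--     i = len(tokens)
--     while i > 0:
--         pair = (tokens[i - 2], tokens[i - 1]) if i >= 2 else None
--         if pair in _BIGRAMS:
--             words.append(_BIGRAMS[pair])
--             i -= 2
--         else:
--             t = tokens[i - 1]
--             words.append(_SPECIAL.get(t, t.capitalize()))
--             i -= 1
--     return (prefix + " ".join(reversed(words))).strip()
-- ===== Notes on version B (the rewrite author's own statement) =====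
-- stated objective: alternative
-- what changed: Replaces A's left-to-right while-loop with per-token if/elif chains by a single right-to-left pass that consumes bigrams from the end of the token list via a bigram table and a table-driven single-token display map (equivalent because no token is both a bigram start and a bigram end).
import Mathlib
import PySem

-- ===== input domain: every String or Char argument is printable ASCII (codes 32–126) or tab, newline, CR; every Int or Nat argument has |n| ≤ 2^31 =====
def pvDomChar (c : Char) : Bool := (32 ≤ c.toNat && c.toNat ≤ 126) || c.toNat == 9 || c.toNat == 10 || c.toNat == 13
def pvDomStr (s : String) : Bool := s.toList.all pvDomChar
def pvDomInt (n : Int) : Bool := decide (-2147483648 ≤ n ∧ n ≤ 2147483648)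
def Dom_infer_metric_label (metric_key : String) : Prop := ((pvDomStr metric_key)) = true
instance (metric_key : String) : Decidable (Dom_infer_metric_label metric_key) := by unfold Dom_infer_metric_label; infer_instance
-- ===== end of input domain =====

-- B replaces A's left-to-right while-loop over the tokens by a single right-to-left pass
-- consuming bigrams from the end with table-driven token display (order provably irrelevant);
-- objective: alternative (same cost).

-- ===== PORT A =====

-- str.capitalize for ASCII (exact on Dom: first char uppercased, rest lowercased)
def pyCapitalize (s : String) : String :=
  match s.toList with
  | [] => ""
  | c :: rest => String.ofList (PySem.Chars.upperChar c :: rest.map PySem.Chars.lowerChar)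

-- the module-level dict literal (distinct keys, insertion order)
def KNOWN_METRIC_LABELS : PySem.Dict String String := PySem.Dict.mk [
  ("patient_roc_auc", "Patient ROC-AUC"),
  ("patient_pr_auc", "Patient PR-AUC"),
  ("patient_balanced_accuracy", "Patient Balanced Accuracy"),
  ("patient_accuracy", "Patient Accuracy"),
  ("patient_f1", "Patient F1"),
  ("patient_mcc", "Patient MCC"),
  ("feature_selection_mean_pairwise_jaccard", "Mean Pairwise Jaccard"),
  ("feature_selection_median_pairwise_jaccard", "Median Pairwise Jaccard"),
  ("feature_selection_kuncheva_index_mean", "Mean Kuncheva Index"),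
  ("feature_selection_kuncheva_index_median", "Median Kuncheva Index"),
  ("feature_selection_mean_top_k_overlap", "Mean Top-k Overlap"),
  ("feature_selection_median_top_k_overlap", "Median Top-k Overlap"),
  ("feature_selection_effect_mean_sign_consistency", "Mean Effect Sign Consistency"),
  ("feature_selection_importance_mean_variance", "Mean Importance Variance"),
  ("feature_selection_class_conditional_selection_available", "Class-Conditional Selection Available"),
  ("feature_selection_ranking_available", "Ranking Stability Available"),
  ("feature_selection_importance_available", "Importance Stability Available"),
  ("feature_selection_resampling_enabled", "Resampling Stability Enabled")]

-- A's while-loop over tokens (index i advancing by 1 or 2) as structural recursion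
def loopA : List String → List String
  | [] => []
  | token :: rest =>
    let next_token : Option String := rest.head?
    if token == "roc" && next_token == some "auc" then "ROC-AUC" :: loopA rest.tail
    else if token == "pr" && next_token == some "auc" then "PR-AUC" :: loopA rest.tail
    else if token == "top" && next_token == some "k" then "Top-k" :: loopA rest.tail
    else if token == "mcc" then "MCC" :: loopA rest
    else if token == "npv" then "NPV" :: loopA rest
    else if token == "f1" then "F1" :: loopA rest
    else if token == "k" then "k" :: loopA rest
    else pyCapitalize token :: loopA rest
termination_by l => l.length
decreasing_by all_goals (simp [List.length_tail]; try omega)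

def infer_metric_label (metric_key : String) : String :=
  match PySem.Dict.get? KNOWN_METRIC_LABELS metric_key with
  | some v => v
  | none =>
    let pr : String × String :=
      if PySem.Str.startswith metric_key "patient_" then ("Patient ", PySem.Str.slice metric_key (some 8) none)
      else if PySem.Str.startswith metric_key "window_" then ("Window ", PySem.Str.slice metric_key (some 7) none)
      else if PySem.Str.startswith metric_key "feature_selection_" then ("", PySem.Str.slice metric_key (some 18) none)
      else ("", metric_key)
    let tokens := (PySem.Str.split? pr.2 "_").getD []  -- sep "_" ≠ "", so split? is always some: exact
    let words := loopA tokens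
    PySem.Str.strip (PySem.Str.join "" [pr.1, PySem.Str.join " " words])

-- ===== PORT B =====

def BIGRAMS : PySem.Dict (String × String) String := PySem.Dict.mk [
  (("roc", "auc"), "ROC-AUC"), (("pr", "auc"), "PR-AUC"), (("top", "k"), "Top-k")]

def SPECIAL : PySem.Dict String String := PySem.Dict.mk [
  ("mcc", "MCC"), ("npv", "NPV"), ("f1", "F1"), ("k", "k")]

-- Source B's while-loop: i runs from len(tokens) down to 0, consuming a bigram (i -= 2) or one
-- token (i -= 1); every index used is nonnegative and in range, so List.getD is exact here
def loopB (tokens : List String) : Nat → List String → List String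
  | 0, words => words
  | 1, words =>
    let t := tokens.getD 0 ""
    loopB tokens 0 (words ++ [PySem.Dict.getD SPECIAL t (pyCapitalize t)])
  | (i+2), words =>
    match PySem.Dict.get? BIGRAMS (tokens.getD i "", tokens.getD (i+1) "") with
    | some w => loopB tokens i (words ++ [w])
    | none =>
      let t := tokens.getD (i+1) ""
      loopB tokens (i+1) (words ++ [PySem.Dict.getD SPECIAL t (pyCapitalize t)])
termination_by i => i

def infer_metric_label_alt (metric_key : String) : String :=
  match PySem.Dict.get? KNOWN_METRIC_LABELS metric_key with
  | some v => v
  | none =>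
    let pr : String × String :=
      if PySem.Str.startswith metric_key "patient_" then ("Patient ", PySem.Str.slice metric_key (some 8) none)
      else if PySem.Str.startswith metric_key "window_" then ("Window ", PySem.Str.slice metric_key (some 7) none)
      else if PySem.Str.startswith metric_key "feature_selection_" then ("", PySem.Str.slice metric_key (some 18) none)
      else ("", metric_key)
    let tokens := (PySem.Str.split? pr.2 "_").getD []  -- sep "_" ≠ "", so split? is always some: exact
    let words := loopB tokens tokens.length []
    PySem.Str.strip (PySem.Str.join "" [pr.1, PySem.Str.join " " words.reverse])

-- ===== PRECONDITION & SPEC =====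
def Spec_infer_metric_label (metric_key : String) (out : String) : Prop := out = infer_metric_label_alt metric_key
instance (metric_key : String) (out : String) : Decidable (Spec_infer_metric_label metric_key out) := by unfold Spec_infer_metric_label; infer_instance

-- ===== CLAIM (what is proved, stated in full; the proofs are below) =====
def Claim_equal_infer_metric_label : Prop := ∀ (metric_key : String), Dom_infer_metric_label metric_key → Spec_infer_metric_label metric_key (infer_metric_label metric_key)

-- ===== LEMMAS AND PROOFS =====

-- proof-side abbreviations
def isBig (a b : String) : Bool :=
  (a == "roc" && b == "auc") || (a == "pr" && b == "auc") || (a == "top" && b == "k")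

def bigOf (a b : String) : String :=
  if a == "roc" && b == "auc" then "ROC-AUC"
  else if a == "pr" && b == "auc" then "PR-AUC" else "Top-k"

def step (t : String) : String := PySem.Dict.getD SPECIAL t (pyCapitalize t)

theorem big_get? (a b : String) :
    PySem.Dict.get? BIGRAMS (a, b) = if isBig a b then some (bigOf a b) else none := by
  simp only [BIGRAMS, PySem.Dict.get?_mk_cons, isBig, bigOf]
  by_cases h1 : a = "roc" <;> by_cases h2 : b = "auc" <;> by_cases h3 : a = "pr" <;>
    by_cases h4 : a = "top" <;> by_cases h5 : b = "k" <;> simp_all [PySem.Dict.get?] <;>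
    (first | (intro hh; subst hh; simp_all) | (split_ifs <;> simp_all))

-- no bigram's first component is a bigram's second component
theorem noOverlap (a b x : String) (h : isBig a b = true) : isBig x a = false := by
  simp only [isBig, Bool.or_eq_true, Bool.and_eq_true, beq_iff_eq] at h ⊢
  rcases h with (⟨h1,_⟩|⟨h1,_⟩)|⟨h1,_⟩ <;> subst h1 <;> simp

theorem step_chain (t : String) :
    (if t == "mcc" then "MCC" else if t == "npv" then "NPV" else if t == "f1" then "F1"
     else if t == "k" then "k" else pyCapitalize t) = step t := by
  simp only [step, SPECIAL, PySem.Dict.getD, PySem.Dict.get?_mk_cons]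
  by_cases h1 : t = "mcc" <;> by_cases h2 : t = "npv" <;> by_cases h3 : t = "f1" <;>
    by_cases h4 : t = "k" <;> simp_all [PySem.Dict.get?] <;>
    (first | (intro hh; subst hh; simp_all) | (split_ifs <;> simp_all))

theorem loopA_single (t : String) : loopA [t] = [step t] := by
  rw [loopA]
  simp only [List.head?_nil, List.tail_nil]
  rw [show ((none : Option String) == some "auc") = false from rfl,
      show ((none : Option String) == some "k") = false from rfl]
  simp only [Bool.and_false, ← step_chain]
  split_ifs <;> simp_all [loopA]

theorem loopA_cons_nobig (x : String) (rest : List String)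
    (h : ∀ n, rest.head? = some n → isBig x n = false) :
    loopA (x :: rest) = step x :: loopA rest := by
  cases hr : rest.head? with
  | none =>
    have ht : rest = [] := by cases rest <;> simp_all
    subst ht
    simpa [loopA] using loopA_single x
  | some n =>
    have hb := h n hr
    have e1 : (x == "roc" && ((some n : Option String) == some "auc")) = false := by
      simp [isBig] at hb ⊢; tauto
    have e2 : (x == "pr" && ((some n : Option String) == some "auc")) = false := by
      simp [isBig] at hb ⊢; tauto
    have e3 : (x == "top" && ((some n : Option String) == some "k")) = false := by
      simp [isBig] at hb ⊢; tauto
    rw [loopA]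
    simp only [hr]
    rw [e1, e2, e3]
    simp only [Bool.false_eq_true, if_false, ← step_chain]
    split_ifs <;> rfl

theorem loopA_cons_big (x y : String) (rest : List String) (h : isBig x y = true) :
    loopA (x :: y :: rest) = bigOf x y :: loopA rest := by
  simp only [isBig, Bool.or_eq_true, Bool.and_eq_true, beq_iff_eq] at h
  rcases h with (⟨hx,hy⟩|⟨hx,hy⟩)|⟨hx,hy⟩ <;> subst hx <;> subst hy <;>
    rw [loopA] <;> simp [bigOf]

theorem loopA_append_big (a b : String) (h : isBig a b = true) (xs : List String) :
    loopA (xs ++ [a, b]) = loopA xs ++ [bigOf a b] := by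
  match xs with
  | [] => rw [List.nil_append, loopA_cons_big a b [] h]; simp [loopA]
  | [x] =>
    rw [show [x] ++ [a, b] = x :: (a :: [b]) from rfl,
        loopA_cons_nobig x (a :: [b]) (by intro n hn; simp at hn; subst hn; exact noOverlap a b x h),
        loopA_cons_big a b [] h, loopA_single]
    simp [loopA]
  | x :: y :: xs' =>
    by_cases hxy : isBig x y = true
    · rw [show (x :: y :: xs') ++ [a, b] = x :: y :: (xs' ++ [a, b]) from rfl,
          loopA_cons_big x y _ hxy, loopA_append_big a b h xs', loopA_cons_big x y xs' hxy]
      simp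
    · have hb' : isBig x y = false := by simpa using hxy
      rw [show (x :: y :: xs') ++ [a, b] = x :: ((y :: xs') ++ [a, b]) from rfl,
          loopA_cons_nobig x ((y :: xs') ++ [a, b]) (by intro n hn; simp at hn; subst hn; exact hb'),
          loopA_append_big a b h (y :: xs'),
          loopA_cons_nobig x (y :: xs') (by intro n hn; simp at hn; subst hn; exact hb')]
      simp
termination_by xs.length

theorem loopA_append_nobig (b : String) (xs : List String)
    (h : ∀ x, xs.getLast? = some x → isBig x b = false) :
    loopA (xs ++ [b]) = loopA xs ++ [step b] := by
  match xs with
  | [] => simp [loopA_single, loopA]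
  | [x] =>
    have hxb : isBig x b = false := h x rfl
    rw [show [x] ++ [b] = x :: [b] from rfl,
        loopA_cons_nobig x [b] (by intro n hn; simp at hn; subst hn; exact hxb),
        loopA_single, loopA_single]
    rfl
  | x :: y :: xs' =>
    have h' : ∀ z, (y :: xs').getLast? = some z → isBig z b = false := by
      intro z hz
      exact h z (by simpa [List.getLast?_cons_cons] using hz)
    by_cases hxy : isBig x y = true
    · rw [show (x :: y :: xs') ++ [b] = x :: y :: (xs' ++ [b]) from rfl,
          loopA_cons_big x y _ hxy,
          loopA_append_nobig b xs' (by
            intro z hz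
            refine h z ?_
            cases xs' with
            | nil => simp at hz
            | cons w ws => simpa [List.getLast?_cons_cons] using hz),
          loopA_cons_big x y xs' hxy]
      simp
    · have hb' : isBig x y = false := by simpa using hxy
      rw [show (x :: y :: xs') ++ [b] = x :: ((y :: xs') ++ [b]) from rfl,
          loopA_cons_nobig x ((y :: xs') ++ [b]) (by intro n hn; simp at hn; subst hn; exact hb'),
          loopA_append_nobig b (y :: xs') h',
          loopA_cons_nobig x (y :: xs') (by intro n hn; simp at hn; subst hn; exact hb')]
      simp
termination_by xs.length

theorem take_succ_getD (l : List String) (n : Nat) (h : n < l.length) :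
    l.take (n+1) = l.take n ++ [l.getD n ""] := by
  rw [List.take_add_one, List.getElem?_eq_getElem h, List.getD_eq_getElem?_getD,
     List.getElem?_eq_getElem h]
  simp

theorem loopB_spec (l : List String) (i : Nat) (hi : i ≤ l.length) (words : List String) :
    loopB l i words = words ++ (loopA (l.take i)).reverse := by
  match i with
  | 0 => simp [loopB, loopA]
  | 1 =>
    have h0 : 0 < l.length := by omega
    have ht : l.take 1 = [l.getD 0 ""] := take_succ_getD l 0 h0
    rw [loopB, loopB_spec l 0 (by omega), ht, loopA_single]
    simp [step, loopA]
  | (i+2) =>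
    have h0 : i < l.length := by omega
    have h1 : i + 1 < l.length := by omega
    have ht : l.take (i+2) = l.take i ++ [l.getD i "", l.getD (i+1) ""] := by
      rw [take_succ_getD l (i+1) h1, take_succ_getD l i h0]
      simp
    cases hbg : PySem.Dict.get? BIGRAMS (l.getD i "", l.getD (i+1) "") with
    | some w =>
      have hbig : isBig (l.getD i "") (l.getD (i+1) "") = true ∧ w = bigOf (l.getD i "") (l.getD (i+1) "") := by
        rw [big_get?] at hbg
        split at hbg
        · next hc => exact ⟨hc, (Option.some.inj hbg).symm⟩
        · exact absurd hbg (by simp)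
      rw [loopB, hbg]
      show loopB l i (words ++ [w]) = words ++ (loopA (l.take (i+2))).reverse
      rw [loopB_spec l i (by omega), ht, loopA_append_big _ _ hbig.1]
      simp [hbig.2]
    | none =>
      have hnb : isBig (l.getD i "") (l.getD (i+1) "") = false := by
        rw [big_get?] at hbg
        split at hbg
        · exact absurd hbg (by simp)
        · next hc => simpa using hc
      have ht1 : l.take (i+2) = l.take (i+1) ++ [l.getD (i+1) ""] := take_succ_getD l (i+1) h1
      have hlast : ∀ x, (l.take (i+1)).getLast? = some x → isBig x (l.getD (i+1) "") = false := by
        intro x hx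
        rw [take_succ_getD l i h0, List.getLast?_concat] at hx
        cases hx
        exact hnb
      rw [loopB, hbg]
      show loopB l (i+1) (words ++ [PySem.Dict.getD SPECIAL (l.getD (i+1) "") (pyCapitalize (l.getD (i+1) ""))]) =
        words ++ (loopA (l.take (i+2))).reverse
      rw [loopB_spec l (i+1) (by omega), ht1, loopA_append_nobig _ _ hlast]
      simp [step]

theorem loop_eq (l : List String) : (loopB l l.length []).reverse = loopA l := by
  rw [loopB_spec l l.length le_rfl, List.take_length]
  simp

-- ===== VERDICT (by name: the statement is the Claim_ definition above) =====
theorem infer_metric_label_spec : Claim_equal_infer_metric_label := by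
  intro metric_key _
  unfold Spec_infer_metric_label infer_metric_label infer_metric_label_alt
  cases PySem.Dict.get? KNOWN_METRIC_LABELS metric_key with
  | some v => rfl
  | none => simp only [loop_eq]
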